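-- pv_equiv track=rewrite | github.com/OpenDCAI/MorphoBench | eval_agent/evaluators/hint_follow.py | parse_hints
-- ===== SOURCE A (Python) =====
-- from typing import Dict, Any, List, Optional, Tuple
--
-- def parse_hints(hint_text: str) -> List[str]:
--     """
--     解析原始 hint 文本，将其分割为单独的 hint 条目。
--
--     支持的格式：
--     1. "- " 开头的多行格式
--     2. 换行符分隔
--     """
--     if not hint_text or not hint_text.strip():
--         return []
--
--     hints = []
--
--     # 处理 "- " 格式
--     if "\n- " in hint_text or hint_text.startswith("- "):
--         lines = hint_text.split("\n")
--         current_hint = []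
--
--         for line in lines:
--             line = line.strip()
--             if line.startswith("- "):
--                 if current_hint:
--                     hints.append(" ".join(current_hint))
--                 current_hint = [line[2:].strip()]
--             elif line and current_hint:
--                 current_hint.append(line)
--
--         if current_hint:
--             hints.append(" ".join(current_hint))
--     else:
--         # 按换行分割
--         for line in hint_text.split("\n"):
--             line = line.strip()
--             if line:
--                 hints.append(line)
--
--     return hints if hints else [hint_text.strip()]
-- ===== SOURCE B (Python) =====
-- def parse_hints(hint_text: str):
--     if not hint_text or not hint_text.strip():
--         return []
--     lines = [l.strip() for l in hint_text.split("\n")]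
--     if "\n- " in hint_text or hint_text.startswith("- "):
--         # two-level index scan: the outer loop seeks the next bullet line,
--         # the inner loop consumes its non-empty continuation lines, and the
--         # finished group is emitted immediately (no pending buffer, no flush)
--         hints = []
--         i, n = 0, len(lines)
--         while i < n:
--             if not lines[i].startswith("- "):
--                 i += 1
--                 continue
--             parts = [lines[i][2:].strip()]
--             i += 1
--             while i < n and not lines[i].startswith("- "):
--                 if lines[i]:
--                     parts.append(lines[i])
--                 i += 1
--             hints.append(" ".join(parts))
--     else:
--         hints = [l for l in lines if l]
--     return hints if hints else [hint_text.strip()]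
-- ===== Notes on version B (the rewrite author's own statement) =====
-- stated objective: alternative
-- what changed: A's single forward fold carrying a pending current-bullet buffer with a post-loop flush is replaced by a staged design: strip all lines once, then a two-level index scan whose outer loop seeks each bullet line and whose inner loop consumes its continuation lines, emitting each finished group immediately (no buffer, no flush); the plain branch becomes a filter comprehension.
import Mathlib
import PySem

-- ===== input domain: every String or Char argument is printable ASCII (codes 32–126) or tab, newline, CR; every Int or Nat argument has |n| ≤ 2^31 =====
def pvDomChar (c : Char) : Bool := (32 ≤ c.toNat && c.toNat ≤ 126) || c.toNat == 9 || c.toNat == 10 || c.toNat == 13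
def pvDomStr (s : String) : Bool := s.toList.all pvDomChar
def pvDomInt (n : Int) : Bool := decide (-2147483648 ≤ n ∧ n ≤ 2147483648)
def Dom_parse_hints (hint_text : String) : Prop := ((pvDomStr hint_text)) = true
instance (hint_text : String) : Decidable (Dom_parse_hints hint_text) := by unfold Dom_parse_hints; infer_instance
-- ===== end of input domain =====

-- B strips all lines once and then groups bullets by a two-level scan (outer
-- loop seeks the next bullet, inner loop consumes its continuation lines),
-- instead of A's single fold with a pending buffer and flush (objective:
-- alternative decomposition, same cost).

-- ===== PORT A =====
-- loop body of A's "- " branch: state = (hints, current_hint)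
def pvStepA (s : List String × List String) (raw : String) : List String × List String :=
  let line := PySem.Str.strip raw
  if PySem.Str.startswith line "- " then
    ((if s.2 ≠ [] then s.1 ++ [PySem.Str.join " " s.2] else s.1),
     [PySem.Str.strip (PySem.Str.slice line (some 2) none)])
  else if line ≠ "" ∧ s.2 ≠ [] then (s.1, s.2 ++ [line])
  else s

-- A's trailing "if current_hint: hints.append(...)"
def pvFinA (s : List String × List String) : List String :=
  if s.2 ≠ [] then s.1 ++ [PySem.Str.join " " s.2] else s.1

def parse_hints (hint_text : String) : List String :=
  if hint_text = "" ∨ PySem.Str.strip hint_text = "" then []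
  else
    let hints : List String :=
      if PySem.Str.isIn "\n- " hint_text ∨ PySem.Str.startswith hint_text "- " then
        pvFinA (((PySem.Str.split? hint_text "\n").getD []).foldl pvStepA ([], []))
      else
        ((PySem.Str.split? hint_text "\n").getD []).foldl
          (fun acc raw =>
            let line := PySem.Str.strip raw
            if line ≠ "" then acc ++ [line] else acc) []
    if hints ≠ [] then hints else [PySem.Str.strip hint_text]

-- ===== PORT B =====
-- B's inner while loop: consume continuation lines (the suffix of stripped
-- lines not yet scanned plays the role of the index cursor); returns the
-- collected non-empty continuation lines and the remaining suffix
def pvBody : List String → List String × List String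
  | [] => ([], [])
  | x :: xs =>
    if PySem.Str.startswith x "- " then ([], x :: xs)
    else
      let br := pvBody xs
      ((if x ≠ "" then x :: br.1 else br.1), br.2)

lemma pvBody_snd_length_le : ∀ (L : List String), (pvBody L).2.length ≤ L.length
  | [] => Nat.le_refl _
  | x :: xs => by
    simp only [pvBody]
    split
    · simp
    · exact Nat.le_succ_of_le (pvBody_snd_length_le xs)

-- B's outer while loop: seek the next bullet line, emit its group at once
def pvBullets : List String → List String
  | [] => []
  | l :: rest =>
    if PySem.Str.startswith l "- " then
      let br := pvBody rest
      PySem.Str.join " " (PySem.Str.strip (PySem.Str.slice l (some 2) none) :: br.1)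
        :: pvBullets br.2
    else pvBullets rest
termination_by L => L.length
decreasing_by
  · exact Nat.lt_succ_of_le (pvBody_snd_length_le rest)
  · exact Nat.lt_succ_of_le (Nat.le_refl _)

def parse_hints_alt (hint_text : String) : List String :=
  if hint_text = "" ∨ PySem.Str.strip hint_text = "" then []
  else
    let lines := ((PySem.Str.split? hint_text "\n").getD []).map PySem.Str.strip
    let hints : List String :=
      if PySem.Str.isIn "\n- " hint_text ∨ PySem.Str.startswith hint_text "- " then
        pvBullets lines
      else lines.filter (· ≠ "")
    if hints ≠ [] then hints else [PySem.Str.strip hint_text]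

-- ===== PRECONDITION & SPEC =====
def Spec_parse_hints (hint_text : String) (out : List String) : Prop := out = parse_hints_alt hint_text
instance (hint_text : String) (out : List String) : Decidable (Spec_parse_hints hint_text out) := by unfold Spec_parse_hints; infer_instance

-- ===== CLAIM (what is proved, stated in full; the proofs are below) =====
def Claim_equal_parse_hints : Prop := ∀ (hint_text : String), Dom_parse_hints hint_text → Spec_parse_hints hint_text (parse_hints hint_text)

-- ===== LEMMAS AND PROOFS =====

-- invariant linking A's forward fold (pending buffer `cur`, final flush) to
-- B's grouping scan over the pre-stripped lines: a nonempty `cur` absorbs the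
-- leading non-bullet lines (pvBody) before B's groups continue.
lemma pv_loop_eq (L : List String) (hints cur : List String) :
    pvFinA (L.foldl pvStepA (hints, cur)) =
      hints ++ (if cur ≠ [] then
          PySem.Str.join " " (cur ++ (pvBody (L.map PySem.Str.strip)).1)
            :: pvBullets (pvBody (L.map PySem.Str.strip)).2
        else pvBullets (L.map PySem.Str.strip)) := by
  induction L generalizing hints cur with
  | nil =>
    simp only [List.foldl, List.map, pvBody, pvBullets, pvFinA]
    by_cases h : cur = [] <;> simp [h]
  | cons l rest ih =>
    rw [List.foldl_cons, List.map_cons]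
    by_cases hb : PySem.Str.startswith (PySem.Str.strip l) "- "
    · have hA : pvStepA (hints, cur) l =
          ((if cur ≠ [] then hints ++ [PySem.Str.join " " cur] else hints),
           [PySem.Str.strip (PySem.Str.slice (PySem.Str.strip l) (some 2) none)]) := by
        simp only [pvStepA]; rw [if_pos hb]
      have hBody : pvBody (PySem.Str.strip l :: rest.map PySem.Str.strip) =
          ([], PySem.Str.strip l :: rest.map PySem.Str.strip) := by
        simp only [pvBody]; rw [if_pos hb]
      have hBul : pvBullets (PySem.Str.strip l :: rest.map PySem.Str.strip) =
          PySem.Str.join " " (PySem.Str.strip (PySem.Str.slice (PySem.Str.strip l) (some 2) none)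
              :: (pvBody (rest.map PySem.Str.strip)).1)
            :: pvBullets (pvBody (rest.map PySem.Str.strip)).2 := by
        rw [pvBullets]; rw [if_pos hb]
      rw [hA, ih, hBody, hBul]
      by_cases hc : cur = []
      · simp [hc]
      · simp [hc, List.append_assoc]
    · by_cases he : PySem.Str.strip l = ""
      · have hA : pvStepA (hints, cur) l = (hints, cur) := by
          simp only [pvStepA]; rw [if_neg hb, if_neg (fun h => h.1 he)]
        have hBody : pvBody (PySem.Str.strip l :: rest.map PySem.Str.strip) =
            pvBody (rest.map PySem.Str.strip) := by
          simp only [pvBody]; rw [if_neg hb]; simp [he]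
        have hBul : pvBullets (PySem.Str.strip l :: rest.map PySem.Str.strip) =
            pvBullets (rest.map PySem.Str.strip) := by
          rw [pvBullets]; rw [if_neg hb]
        rw [hA, ih, hBody, hBul]
      · by_cases hc : cur = []
        · have hA : pvStepA (hints, cur) l = (hints, cur) := by
            simp only [pvStepA]; rw [if_neg hb, if_neg (fun h => h.2 hc)]
          have hBul : pvBullets (PySem.Str.strip l :: rest.map PySem.Str.strip) =
              pvBullets (rest.map PySem.Str.strip) := by
            rw [pvBullets]; rw [if_neg hb]
          rw [hA, ih, hBul]
          simp [hc]
        · have hA : pvStepA (hints, cur) l = (hints, cur ++ [PySem.Str.strip l]) := by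
            simp only [pvStepA]; rw [if_neg hb, if_pos ⟨he, hc⟩]
          have hBody : pvBody (PySem.Str.strip l :: rest.map PySem.Str.strip) =
              (PySem.Str.strip l :: (pvBody (rest.map PySem.Str.strip)).1,
               (pvBody (rest.map PySem.Str.strip)).2) := by
            simp only [pvBody]; rw [if_neg hb]; simp [he]
          rw [hA, ih, hBody]
          simp [hc, List.append_assoc]

-- ===== VERDICT (by name: the statement is the Claim_ definition above) =====
theorem parse_hints_spec : Claim_equal_parse_hints := by
  intro hint_text _
  unfold Spec_parse_hints parse_hints parse_hints_alt
  by_cases h0 : hint_text = "" ∨ PySem.Str.strip hint_text = ""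
  · simp [h0]
  · simp only [h0, if_false]
    by_cases hg : PySem.Str.isIn "\n- " hint_text ∨ PySem.Str.startswith hint_text "- "
    · simp only [hg, if_true]
      rw [pv_loop_eq]
      simp
    · simp only [hg, if_false]
      rw [PySem.List.foldl_append_ite (p := fun raw => PySem.Str.strip raw ≠ "")
            (f := PySem.Str.strip)]
      rw [List.filter_map]
      rfl
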